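-- pv_equiv track=rewrite | github.com/alskgj/checkio_stuff | Electronic_Station/color_map.py | create_neighbours
-- ===== SOURCE A (Python) =====
-- def create_neighbours(region):
--     """neighbour is a dict containing
--     all countries as keys and all
--     neighbouring countries as values.
--     #
--     # (0, 0, 0, 3),
--     # (0, 1, 1, 1),
--     # (0, 0, 2, 0)
--     #
--     corresponds to:
--     # {0: {1, 2, 3}, 1: {0, 2, 3}, 2: {0, 1}, 3: {0, 1}}"""
--     neighbours = dict()
--     for i, row in enumerate(region):
--         for j, cell in enumerate(row):
--
--             # new entry in neighbours
--             if cell not in neighbours: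
--                 neighbours[cell] = set()
--
--             # check all adjacent countries
--             if j > 0 and cell != region[i][j-1]:
--                 neighbours[cell].add(region[i][j-1])
--
--             if j < len(row)-1 and cell != region[i][j+1]:
--                 neighbours[cell].add(region[i][j+1])
--             #
--             if i > 0 and cell != region[i-1][j]:
--                 neighbours[cell].add(region[i-1][j])
--
--             if i < len(region)-1 and cell != region[i+1][j]:
--                 neighbours[cell].add(region[i+1][j])
--
--     return neighbours
-- ===== SOURCE B (Python) =====
-- def create_neighbours(region):
--     """Key-major, staged computation: flatten the grid to a cell list once,
--     then for each country (in first-occurrence order) build its complete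
--     neighbour set with one dedicated comprehension scan over all cells."""
--     h = len(region)
--     cells = [(i, j, c) for i, row in enumerate(region) for j, c in enumerate(row)]
--
--     def adjacent(i, j):
--         row = region[i]
--         out = []
--         if j > 0:
--             out.append(row[j - 1])
--         if j < len(row) - 1:
--             out.append(row[j + 1])
--         if i > 0:
--             out.append(region[i - 1][j])
--         if i < h - 1:
--             out.append(region[i + 1][j])
--         return out
--
--     result = {}
--     for _, _, c in cells:
--         if c not in result:
--             result[c] = {v for i, j, cc in cells if cc == c
--                            for v in adjacent(i, j) if v != c}
--     return result
-- ===== Notes on version B (the rewrite author's own statement) =====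
-- stated objective: alternative
-- what changed: Replaces A's single cell-major pass that incrementally maintains every country's set at once by a key-major staged algorithm: flatten the grid into a cell list, then for each country in first-occurrence order build its entire neighbour set in one dedicated comprehension scan of all cells (trades A's O(n*m) incremental update for one grouped scan per distinct country).
import Mathlib
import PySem

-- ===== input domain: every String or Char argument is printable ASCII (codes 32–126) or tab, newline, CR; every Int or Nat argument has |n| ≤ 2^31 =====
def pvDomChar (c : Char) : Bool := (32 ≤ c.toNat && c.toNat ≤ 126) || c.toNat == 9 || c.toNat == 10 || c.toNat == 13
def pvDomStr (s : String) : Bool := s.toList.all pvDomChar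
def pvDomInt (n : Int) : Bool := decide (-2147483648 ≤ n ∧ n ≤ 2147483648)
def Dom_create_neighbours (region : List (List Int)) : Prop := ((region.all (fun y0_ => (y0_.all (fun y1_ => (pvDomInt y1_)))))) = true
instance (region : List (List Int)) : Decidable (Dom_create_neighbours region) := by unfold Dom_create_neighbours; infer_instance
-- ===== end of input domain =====

-- B replaces A's cell-major pass that maintains every country's set at once by a
-- key-major staged algorithm (flatten to a cell list, then one dedicated scan per
-- distinct country); equal on all rectangular grids (Pre_), where A returns at all.

-- ===== PORT A =====
-- A-side helpers: 'if cell not in neighbours: neighbours[cell] = set()' and one guarded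
-- directional add 'if <cond> and cell != v: neighbours[cell].add(v)'.
def pvEnsure (nbs : PySem.Dict Int (PySem.Set Int)) (cell : Int) : PySem.Dict Int (PySem.Set Int) :=
  if nbs.contains cell then nbs else nbs.insert cell []

def pvAddA (nbs : PySem.Dict Int (PySem.Set Int)) (cell : Int) (b : Prop) [Decidable b] (v : Int) :
    PySem.Dict Int (PySem.Set Int) :=
  if b ∧ cell ≠ v then nbs.modify cell [] (fun s => PySem.Set.add s v) else nbs

-- literal port of Source A: nested enumerate loops, four bounds-checked directional adds
-- (left, right, up, down, in Source A's order).
-- (Python's region[i][j-1]/region[i][j+1] is row[j-1]/row[j+1]: enumerate binds row = region[i].)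
def create_neighbours (region : List (List Int)) : List (Int × List Int) :=
  ((PySem.List.enumerate region).foldl (fun nbs (i, row) =>
    (PySem.List.enumerate row).foldl (fun nbs (j, cell) =>
      pvAddA (pvAddA (pvAddA (pvAddA (pvEnsure nbs cell)
        cell (0 < j) (PySem.List.pyGetD row (j - 1) cell))
        cell (j < (row.length : Int) - 1) (PySem.List.pyGetD row (j + 1) cell))
        cell (0 < i) (PySem.List.pyGetD (PySem.List.pyGetD region (i - 1) []) j cell))
        cell (i < (region.length : Int) - 1) (PySem.List.pyGetD (PySem.List.pyGetD region (i + 1) []) j cell))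
      nbs) PySem.Dict.empty).items

-- ===== PORT B =====
-- B-side helper: 'adjacent(i, j)' — the up-to-four conditional appends, in source order.
def pvAdjacent (region : List (List Int)) (h : Int) (i j : Int) : List Int :=
  let row := PySem.List.pyGetD region i []
  (if 0 < j then [PySem.List.pyGetD row (j - 1) 0] else []) ++
  (if j < (row.length : Int) - 1 then [PySem.List.pyGetD row (j + 1) 0] else []) ++
  (if 0 < i then [PySem.List.pyGetD (PySem.List.pyGetD region (i - 1) []) j 0] else []) ++
  (if i < h - 1 then [PySem.List.pyGetD (PySem.List.pyGetD region (i + 1) []) j 0] else [])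

-- B-side helper: 'cells = [(i, j, c) for i, row in enumerate(region) for j, c in enumerate(row)]'
def pvCells (region : List (List Int)) : List (Int × Int × Int) :=
  (PySem.List.enumerate region).flatMap (fun p =>
    (PySem.List.enumerate p.2).map (fun q => (p.1, q.1, q.2)))

-- literal port of Source B: key-major — for each country (first-occurrence order) one
-- dedicated set-comprehension scan over the whole cell list.
def create_neighbours_alt (region : List (List Int)) : List (Int × List Int) :=
  let h := (region.length : Int)
  let cells := pvCells region
  (cells.foldl (fun d t =>
    if d.contains t.2.2 then d
    else d.insert t.2.2 (PySem.Set.ofList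
      ((cells.filter (fun u => u.2.2 == t.2.2)).flatMap (fun u =>
        (pvAdjacent region h u.1 u.2.1).filter (fun v => v != t.2.2))))) PySem.Dict.empty).items

-- ===== PRECONDITION & SPEC =====
-- Pre_ excludes exactly the ragged grids (two vertically adjacent rows of different
-- lengths), on every one of which A raises IndexError probing the shorter row.
def Pre_create_neighbours (region : List (List Int)) : Prop :=
  List.IsChain (fun r s : List Int => r.length = s.length) region
instance (region : List (List Int)) : Decidable (Pre_create_neighbours region) := by
  unfold Pre_create_neighbours; infer_instance

def pvWitness_create_neighbours : List (List Int) := [[0, 0, 3], [0, 1, 1], [0, 2, 0]]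

def Spec_create_neighbours (region : List (List Int)) (out : List (Int × List Int)) : Prop := out = create_neighbours_alt region
instance (region : List (List Int)) (out : List (Int × List Int)) : Decidable (Spec_create_neighbours region out) := by unfold Spec_create_neighbours; infer_instance

-- ===== CLAIM (what is proved, stated in full; the proofs are below) =====
def Claim_equal_create_neighbours : Prop := ∀ (region : List (List Int)), Dom_create_neighbours region → Pre_create_neighbours region → Spec_create_neighbours region (create_neighbours region)

-- ===== LEMMAS AND PROOFS =====

-- proof-side abbreviations
def pvAdd1 (c : Int) (d : PySem.Dict Int (PySem.Set Int)) (v : Int) : PySem.Dict Int (PySem.Set Int) :=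
  d.modify c [] (fun s => PySem.Set.add s v)

def pvG (region : List (List Int)) (t : Int × Int × Int) : List Int :=
  (pvAdjacent region (region.length : Int) t.1 t.2.1).filter (fun v => v != t.2.2)

def pvFA (l : List (Int × List Int)) : PySem.Dict Int (PySem.Set Int) :=
  l.foldl (fun d p => p.2.foldl (pvAdd1 p.1) (d.setdefault p.1 [])) PySem.Dict.empty

def pvFB (ks : List Int) (S : Int → PySem.Set Int) : PySem.Dict Int (PySem.Set Int) :=
  ks.foldl (fun d c => if d.contains c then d else d.insert c (S c)) PySem.Dict.empty

lemma pv_foldl_flatMap {α β γ : Type} (l : List α) (f : α → List β) (g : γ → β → γ) (init : γ) :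
    (l.flatMap f).foldl g init = l.foldl (fun a x => (f x).foldl g a) init := by
  induction l generalizing init with
  | nil => rfl
  | cons x xs ih => simp [List.flatMap_cons, List.foldl_append, ih]


lemma pv_addA_eq (d : PySem.Dict Int (PySem.Set Int)) (c : Int) (b : Prop) [Decidable b] (v : Int) :
    pvAddA d c b v = (if b ∧ c ≠ v then [v] else []).foldl (pvAdd1 c) d := by
  split_ifs with h <;> simp [pvAddA, pvAdd1, h]

lemma pv_ensure_eq (d : PySem.Dict Int (PySem.Set Int)) (c : Int) :
    pvEnsure d c = d.setdefault c [] := by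
  by_cases h : d.contains c = true
  · rw [PySem.Dict.setdefault_of_contains d [] h]; simp [pvEnsure, h]
  · rw [PySem.Dict.setdefault_of_not_contains d [] (by simpa using h)]; simp [pvEnsure, h]

lemma pv_keys_foldl_add1 (g : List Int) (d : PySem.Dict Int (PySem.Set Int)) (c : Int)
    (hc : d.contains c = true) :
    (g.foldl (pvAdd1 c) d).keys = d.keys := by
  induction g generalizing d with
  | nil => rfl
  | cons v g ih =>
      simp only [List.foldl_cons]
      rw [ih]
      · simp [pvAdd1, PySem.Dict.keys_modify, PySem.Dict.keys_insert_of_contains, hc]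
      · simp [pvAdd1, PySem.Dict.contains_modify, hc]

lemma pv_getD_foldl_add1_self (g : List Int) (d : PySem.Dict Int (PySem.Set Int)) (c : Int) :
    (g.foldl (pvAdd1 c) d).getD c [] = PySem.Set.update (d.getD c []) g := by
  induction g generalizing d with
  | nil => rfl
  | cons v g ih =>
      simp only [List.foldl_cons, ih, pvAdd1, PySem.Dict.getD_modify_self]
      rfl

lemma pv_getD_foldl_add1_ne (g : List Int) (d : PySem.Dict Int (PySem.Set Int)) (c c' : Int)
    (h : c' ≠ c) :
    (g.foldl (pvAdd1 c) d).getD c' [] = d.getD c' [] := by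
  induction g generalizing d with
  | nil => rfl
  | cons v g ih => simp [List.foldl_cons, ih, pvAdd1, PySem.Dict.getD_modify, h]

lemma pv_ofList_append (as bs : List Int) :
    PySem.Set.ofList (as ++ bs) = PySem.Set.update (PySem.Set.ofList as) bs := by
  rw [PySem.Set.ofList_eq_foldl, List.foldl_append, ← PySem.Set.ofList_eq_foldl]
  rfl


lemma pv_set_add_of_mem {s : PySem.Set Int} {x : Int} (h : x ∈ s) : PySem.Set.add s x = s := by
  simp [PySem.Set.add, h]

lemma pv_set_add_of_not_mem {s : PySem.Set Int} {x : Int} (h : x ∉ s) :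
    PySem.Set.add s x = s ++ [x] := by
  simp [PySem.Set.add, h]

lemma pv_ofList_concat (as : List Int) (x : Int) :
    PySem.Set.ofList (as ++ [x]) = PySem.Set.add (PySem.Set.ofList as) x := by
  rw [pv_ofList_append]; rfl

lemma pv_filter_singleton_ne {c w : Int} (h : ¬ c = w) :
    List.filter (fun v => v != c) [w] = [w] := by
  simp [Ne.symm h]

lemma pv_filter_singleton_eq {c w : Int} (h : c = w) :
    List.filter (fun v => v != c) [w] = [] := by
  simp [h]

lemma pv_FA_keys (l : List (Int × List Int)) :
    (pvFA l).keys = PySem.Set.ofList (l.map (·.1)) := by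
  induction l using List.reverseRecOn with
  | nil => rfl
  | append_singleton l p ih =>
      unfold pvFA at ih ⊢
      rw [List.foldl_append, List.foldl_cons, List.foldl_nil]
      rw [pv_keys_foldl_add1 _ _ _ (by simp [PySem.Dict.contains_setdefault])]
      rw [List.map_append, List.map_cons, List.map_nil, pv_ofList_concat, ← ih]
      by_cases hc : (List.foldl (fun d p => List.foldl (pvAdd1 p.1) (d.setdefault p.1 []) p.2) PySem.Dict.empty l).contains p.1 = true
      · rw [PySem.Dict.setdefault_of_contains _ _ hc,
          pv_set_add_of_mem ((PySem.Dict.contains_iff_mem_keys _ _).mp hc)]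
      · rw [PySem.Dict.setdefault_of_not_contains _ _ (by simpa using hc),
          PySem.Dict.keys_insert_of_not_contains _ _ (by simpa using hc),
          pv_set_add_of_not_mem (fun hm => hc ((PySem.Dict.contains_iff_mem_keys _ _).mpr hm))]

lemma pv_FA_getD (l : List (Int × List Int)) (c : Int) :
    (pvFA l).getD c [] = PySem.Set.ofList ((l.filter (fun p => p.1 == c)).flatMap (fun p => p.2)) := by
  induction l using List.reverseRecOn with
  | nil => rfl
  | append_singleton l p ih =>
      unfold pvFA at ih ⊢
      rw [List.foldl_append, List.foldl_cons, List.foldl_nil]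
      by_cases hc : p.1 = c
      · subst hc
        rw [pv_getD_foldl_add1_self, PySem.Dict.getD_setdefault_self, ih,
          List.filter_append, List.filter_cons]
        simp only [BEq.rfl, if_pos, List.filter_nil, List.flatMap_append, List.flatMap_cons,
          List.flatMap_nil, List.append_nil, pv_ofList_append]
      · rw [pv_getD_foldl_add1_ne _ _ _ _ (fun h => hc h.symm),
          PySem.Dict.getD_eq_get?_getD, PySem.Dict.get?_setdefault_of_ne _ _ (fun h => hc h.symm),
          ← PySem.Dict.getD_eq_get?_getD, ih, List.filter_append, List.filter_cons]
        simp [hc]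

lemma pv_FB_items (ks : List Int) (S : Int → PySem.Set Int) :
    (pvFB ks S).items = (PySem.Set.ofList ks).map (fun c => (c, S c)) := by
  induction ks using List.reverseRecOn with
  | nil => rfl
  | append_singleton ks c ih =>
      unfold pvFB at ih ⊢
      rw [List.foldl_append, List.foldl_cons, List.foldl_nil, pv_ofList_concat]
      have hkeys : (List.foldl (fun d c => if d.contains c then d else d.insert c (S c)) PySem.Dict.empty ks).keys = PySem.Set.ofList ks := by
        simp [PySem.Dict.keys, ih, List.map_map, Function.comp_def]
      by_cases hm : c ∈ ks
      · have hc : (List.foldl (fun d c => if d.contains c then d else d.insert c (S c)) PySem.Dict.empty ks).contains c = true := by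
          rw [PySem.Dict.contains_iff_mem_keys _ c, hkeys]
          exact (PySem.Set.mem_ofList _ _).mpr hm
        rw [if_pos hc, pv_set_add_of_mem ((PySem.Set.mem_ofList _ _).mpr hm), ih]
      · have hc : (List.foldl (fun d c => if d.contains c then d else d.insert c (S c)) PySem.Dict.empty ks).contains c = false := by
          rw [Bool.eq_false_iff]
          intro h
          rw [PySem.Dict.contains_iff_mem_keys _ c, hkeys, PySem.Set.mem_ofList] at h
          exact hm h
        rw [if_neg (by simp [hc]), PySem.Dict.items_insert_of_not_contains _ _ hc, ih,
          pv_set_add_of_not_mem (fun h => hm ((PySem.Set.mem_ofList _ _).mp h)), List.map_append]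
        rfl


lemma pv_cell_eq (region : List (List Int)) (k : Nat) (hk : k < region.length)
    (jk : Nat) (hj : jk < region[k].length) (d : PySem.Dict Int (PySem.Set Int))
    (hup : 0 < k → (PySem.List.pyGetD region ((k : Int) - 1) []).length = region[k].length)
    (hdn : (k : Int) + 1 < (region.length : Int) → (PySem.List.pyGetD region ((k : Int) + 1) []).length = region[k].length) :
    pvAddA (pvAddA (pvAddA (pvAddA (pvEnsure d region[k][jk])
        region[k][jk] (0 < (jk : Int)) (PySem.List.pyGetD region[k] ((jk : Int) - 1) region[k][jk]))
        region[k][jk] ((jk : Int) < (region[k].length : Int) - 1) (PySem.List.pyGetD region[k] ((jk : Int) + 1) region[k][jk]))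
        region[k][jk] (0 < (k : Int)) (PySem.List.pyGetD (PySem.List.pyGetD region ((k : Int) - 1) []) (jk : Int) region[k][jk]))
        region[k][jk] ((k : Int) < (region.length : Int) - 1) (PySem.List.pyGetD (PySem.List.pyGetD region ((k : Int) + 1) []) (jk : Int) region[k][jk])
    = (pvG region ((k : Int), (jk : Int), region[k][jk])).foldl (pvAdd1 region[k][jk])
        (d.setdefault region[k][jk] []) := by
  rw [pv_ensure_eq, pv_addA_eq, pv_addA_eq, pv_addA_eq, pv_addA_eq,
    ← List.foldl_append, ← List.foldl_append, ← List.foldl_append]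
  congr 1
  have hr : PySem.List.pyGetD region ((k : Nat) : Int) [] = region[k] := by
    rw [PySem.List.pyGetD_natCast]; exact List.getD_eq_getElem region [] hk
  have e1 : (if (0 < (jk : Int)) ∧ region[k][jk] ≠ PySem.List.pyGetD region[k] ((jk : Int) - 1) region[k][jk]
        then [PySem.List.pyGetD region[k] ((jk : Int) - 1) region[k][jk]] else [])
      = List.filter (fun v => v != region[k][jk])
          (if 0 < (jk : Int) then [PySem.List.pyGetD region[k] ((jk : Int) - 1) 0] else []) := by
    by_cases h1 : 0 < (jk : Int)
    · rw [if_pos h1,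
        PySem.List.pyGetD_eq_getElem region[k] region[k][jk] (by omega) (by omega),
        PySem.List.pyGetD_eq_getElem region[k] 0 (by omega) (by omega)]
      by_cases h2 : region[k][jk] = region[k][((jk : Int) - 1).toNat]'(by omega)
      · rw [if_neg (fun hh => hh.2 h2), pv_filter_singleton_eq h2]
      · rw [if_pos ⟨h1, h2⟩, pv_filter_singleton_ne h2]
    · rw [if_neg (fun hh => h1 hh.1), if_neg h1]
      rfl
  have e2 : (if ((jk : Int) < (region[k].length : Int) - 1) ∧ region[k][jk] ≠ PySem.List.pyGetD region[k] ((jk : Int) + 1) region[k][jk]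
        then [PySem.List.pyGetD region[k] ((jk : Int) + 1) region[k][jk]] else [])
      = List.filter (fun v => v != region[k][jk])
          (if (jk : Int) < ((region[k].length : Int)) - 1 then [PySem.List.pyGetD region[k] ((jk : Int) + 1) 0] else []) := by
    by_cases h1 : (jk : Int) < (region[k].length : Int) - 1
    · rw [if_pos h1,
        PySem.List.pyGetD_eq_getElem region[k] region[k][jk] (by omega) (by omega),
        PySem.List.pyGetD_eq_getElem region[k] 0 (by omega) (by omega)]
      by_cases h2 : region[k][jk] = region[k][((jk : Int) + 1).toNat]'(by omega)
      · rw [if_neg (fun hh => hh.2 h2), pv_filter_singleton_eq h2]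
      · rw [if_pos ⟨h1, h2⟩, pv_filter_singleton_ne h2]
    · rw [if_neg (fun hh => h1 hh.1), if_neg h1]
      rfl
  have e3 : (if (0 < (k : Int)) ∧ region[k][jk] ≠ PySem.List.pyGetD (PySem.List.pyGetD region ((k : Int) - 1) []) ((jk : Nat) : Int) region[k][jk]
        then [PySem.List.pyGetD (PySem.List.pyGetD region ((k : Int) - 1) []) ((jk : Nat) : Int) region[k][jk]] else [])
      = List.filter (fun v => v != region[k][jk])
          (if 0 < (k : Int) then [PySem.List.pyGetD (PySem.List.pyGetD region ((k : Int) - 1) []) ((jk : Nat) : Int) 0] else []) := by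
    by_cases h1 : 0 < (k : Int)
    · have hl := hup (by exact_mod_cast h1)
      rw [if_pos h1, PySem.List.pyGetD_natCast, PySem.List.pyGetD_natCast,
        List.getD_eq_getElem _ _ (by omega), List.getD_eq_getElem _ _ (by omega)]
      by_cases h2 : region[k][jk] = (PySem.List.pyGetD region ((k : Int) - 1) [])[jk]'(by omega)
      · rw [if_neg (fun hh => hh.2 h2), pv_filter_singleton_eq h2]
      · rw [if_pos ⟨h1, h2⟩, pv_filter_singleton_ne h2]
    · rw [if_neg (fun hh => h1 hh.1), if_neg h1]
      rfl
  have e4 : (if ((k : Int) < (region.length : Int) - 1) ∧ region[k][jk] ≠ PySem.List.pyGetD (PySem.List.pyGetD region ((k : Int) + 1) []) ((jk : Nat) : Int) region[k][jk]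
        then [PySem.List.pyGetD (PySem.List.pyGetD region ((k : Int) + 1) []) ((jk : Nat) : Int) region[k][jk]] else [])
      = List.filter (fun v => v != region[k][jk])
          (if (k : Int) < (region.length : Int) - 1 then [PySem.List.pyGetD (PySem.List.pyGetD region ((k : Int) + 1) []) ((jk : Nat) : Int) 0] else []) := by
    by_cases h1 : (k : Int) < (region.length : Int) - 1
    · have hl := hdn (by omega)
      rw [if_pos h1, PySem.List.pyGetD_natCast, PySem.List.pyGetD_natCast,
        List.getD_eq_getElem _ _ (by omega), List.getD_eq_getElem _ _ (by omega)]
      by_cases h2 : region[k][jk] = (PySem.List.pyGetD region ((k : Int) + 1) [])[jk]'(by omega)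
      · rw [if_neg (fun hh => hh.2 h2), pv_filter_singleton_eq h2]
      · rw [if_pos ⟨h1, h2⟩, pv_filter_singleton_ne h2]
    · rw [if_neg (fun hh => h1 hh.1), if_neg h1]
      rfl
  unfold pvG pvAdjacent
  simp only [hr, List.filter_append]
  rw [e1, e2, e3, e4]
  simp [List.append_assoc]

theorem create_neighbours_spec : Claim_equal_create_neighbours := by
  intro region _ hpre
  unfold Spec_create_neighbours create_neighbours create_neighbours_alt
  dsimp only []
  -- A's nested fold = pvFA over the (country, added-values) pairs of the cell list
  have hA : ((PySem.List.enumerate region).foldl (fun nbs (i, row) =>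
      (PySem.List.enumerate row).foldl (fun nbs (j, cell) =>
        pvAddA (pvAddA (pvAddA (pvAddA (pvEnsure nbs cell)
          cell (0 < j) (PySem.List.pyGetD row (j - 1) cell))
          cell (j < (row.length : Int) - 1) (PySem.List.pyGetD row (j + 1) cell))
          cell (0 < i) (PySem.List.pyGetD (PySem.List.pyGetD region (i - 1) []) j cell))
          cell (i < (region.length : Int) - 1) (PySem.List.pyGetD (PySem.List.pyGetD region (i + 1) []) j cell))
        nbs) PySem.Dict.empty)
      = pvFA ((pvCells region).map (fun t => (t.2.2, pvG region t))) := by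
    unfold pvFA
    rw [List.foldl_map]
    unfold pvCells
    rw [pv_foldl_flatMap]
    apply PySem.List.foldl_congr_mem
    intro d p hp
    rw [PySem.List.mem_enumerate_iff] at hp
    obtain ⟨k, hk, rfl⟩ := hp
    rw [List.foldl_map]
    apply PySem.List.foldl_congr_mem
    intro d' q hq
    rw [PySem.List.mem_enumerate_iff] at hq
    obtain ⟨jk, hjk, rfl⟩ := hq
    simp only [zero_add]
    have hup : 0 < k → (PySem.List.pyGetD region ((k : Int) - 1) []).length = region[k].length := by
      intro h
      have hc := hpre.getElem (i := k - 1) (by omega)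
      have hk1 : k - 1 + 1 = k := by omega
      simp only [hk1] at hc
      rw [PySem.List.pyGetD_eq_getElem region [] (by omega) (by omega)]
      have ht : ((k : Int) - 1).toNat = k - 1 := by omega
      simp only [ht]
      exact hc
    have hdn : (k : Int) + 1 < (region.length : Int) → (PySem.List.pyGetD region ((k : Int) + 1) []).length = region[k].length := by
      intro h
      have hc := hpre.getElem (i := k) (by omega)
      rw [PySem.List.pyGetD_eq_getElem region [] (by omega) (by omega)]
      have ht : ((k : Int) + 1).toNat = k + 1 := by omega
      simp only [ht]
      exact hc.symm
    exact pv_cell_eq region k hk jk hjk d' hup hdn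
  rw [hA]
  -- B's fold = pvFB over the country list with the per-country comprehension
  have hB : ((pvCells region).foldl (fun d t =>
      if d.contains t.2.2 then d
      else d.insert t.2.2 (PySem.Set.ofList
        (((pvCells region).filter (fun u => u.2.2 == t.2.2)).flatMap (fun u =>
          (pvAdjacent region (region.length : Int) u.1 u.2.1).filter (fun v => v != t.2.2))))) PySem.Dict.empty)
      = pvFB ((pvCells region).map (fun t => t.2.2)) (fun c => PySem.Set.ofList
        (((pvCells region).filter (fun u => u.2.2 == c)).flatMap (fun u =>
          (pvAdjacent region (region.length : Int) u.1 u.2.1).filter (fun v => v != c)))) := by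
    unfold pvFB
    rw [List.foldl_map]
  rw [hB, pv_FB_items]
  have hnodup : (pvFA ((pvCells region).map (fun t => (t.2.2, pvG region t)))).keys.Nodup := by
    rw [pv_FA_keys]
    exact PySem.Set.nodup_ofList _
  rw [PySem.Dict.items_eq_map_keys _ hnodup [], pv_FA_keys]
  have hfst : ((pvCells region).map (fun t => (t.2.2, pvG region t))).map (fun p => p.1)
      = (pvCells region).map (fun t => t.2.2) := by
    rw [List.map_map]
    exact List.map_congr_left (fun t _ => rfl)
  rw [hfst]
  apply List.map_congr_left
  intro c _
  dsimp only
  rw [pv_FA_getD, List.filter_map, List.flatMap_map]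
  congr 1
  have hfilter : List.filter ((fun p => (p : Int × List Int).1 == c) ∘ fun t => ((t : Int × Int × Int).2.2, pvG region t)) (pvCells region)
      = List.filter (fun u => (u : Int × Int × Int).2.2 == c) (pvCells region) :=
    List.filter_congr (fun t _ => rfl)
  rw [hfilter]
  congr 1
  apply List.flatMap_congr
  intro t ht
  dsimp only
  have htc : t.2.2 = c := beq_iff_eq.mp (List.mem_filter.mp ht).2
  simp only [pvG, htc]
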